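-- pv_equiv track=rewrite | github.com/sevvalmehder/GTU-Homeworks | IntroductionToAlgorithmDesign/Homework2/findRottenWalnut[151044009].py | find_rotten
-- ===== SOURCE A (Python) =====
-- def find_rotten(weight_list):
--     # Find the middle element
--     middle = len(weight_list) // 2
--
--     # Find the right and the left scale list
--     # If list has odd element don't include middle
--     left_scale = weight_list[:middle]
--     right_scale = weight_list[middle:] if len(weight_list) % 2 == 0 else weight_list[(middle + 1):]
--
--     # If the rotten one is the middle
--     if compareScales(left_scale, right_scale) == 0:
--         return middle if weight_list[middle] != 1 else -1
--
--
--     # If the rotten one is on the left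
--     elif compareScales(left_scale, right_scale) == 1:
--         return find_rotten(left_scale)
--
--     # If the rotten one is on the right
--     # If list has odd element count the middle
--     else:
--         if len(weight_list) % 2 == 0:
--             return len(left_scale) + find_rotten(right_scale)
--         else:
--             return len(left_scale) + 1 + find_rotten(right_scale)
--
-- def compareScales(leftScaleList, rightScaleList):
--     result = sum(leftScaleList) - sum(rightScaleList)
--     if result < 0:
--         return 1
--     elif result > 0:
--         return -1
--     else:
--         return 0
-- ===== SOURCE B (Python) =====
-- def find_rotten(weight_list):
--     # Prefix-sum table built once; then an index-bounds binary search over the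
--     # original list -- no slicing, no recursion, scale sums read from the table.
--     prefix = [0]
--     total = 0
--     for w in weight_list:
--         total += w
--         prefix.append(total)
--     lo, hi = 0, len(weight_list)
--     while True:
--         mid = (hi - lo) // 2
--         odd = (hi - lo) % 2
--         left_sum = prefix[lo + mid] - prefix[lo]
--         right_sum = prefix[hi] - prefix[lo + mid + odd]
--         diff = left_sum - right_sum
--         if diff == 0:
--             return lo + mid if weight_list[lo + mid] != 1 else lo - 1
--         elif diff < 0:
--             hi = lo + mid
--         else:
--             lo = lo + mid + odd
-- ===== Notes on version B (the rewrite author's own statement) =====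
-- stated objective: alternative
-- what changed: A's recursion on slice copies (re-summing each slice via compareScales) is replaced by a prefix-sum table built once plus an iterative binary search over index bounds (lo, hi) into the original list, with scale sums read from the table and no slicing or helper.
import Mathlib
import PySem

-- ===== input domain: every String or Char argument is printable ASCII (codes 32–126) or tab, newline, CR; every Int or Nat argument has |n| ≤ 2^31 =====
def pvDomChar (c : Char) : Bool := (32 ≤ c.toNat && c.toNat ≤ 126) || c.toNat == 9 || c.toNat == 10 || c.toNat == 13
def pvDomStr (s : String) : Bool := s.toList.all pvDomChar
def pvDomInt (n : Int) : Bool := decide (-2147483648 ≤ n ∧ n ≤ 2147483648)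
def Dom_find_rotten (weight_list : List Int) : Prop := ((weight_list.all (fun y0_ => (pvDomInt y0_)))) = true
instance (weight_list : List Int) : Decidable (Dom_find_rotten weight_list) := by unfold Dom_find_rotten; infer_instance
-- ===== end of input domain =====

-- B replaces A's slice-copy recursion by a prefix-sum table plus an iterative
-- index-bounds binary search over the original list (objective: alternative).


-- ===== PORT A =====
-- compareScales(left, right): sign comparison of the two sums
def compareScales (leftScaleList rightScaleList : List Int) : Int :=
  let result := leftScaleList.sum - rightScaleList.sum
  if result < 0 then 1 else if result > 0 then -1 else 0

-- literal port of A's recursion; a fuel argument (length+1, always sufficient: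
-- every recursive call is on a strictly shorter list) makes it total in Lean.
-- Slices with nonnegative indices are exactly take/drop.
def findRottenGoA : Nat → List Int → Int
  | 0, _ => 0    -- fuel exhausted: unreachable for fuel = length + 1
  | fuel + 1, wl =>
    let middle := wl.length / 2
    let left_scale := wl.take middle
    let right_scale := if wl.length % 2 == 0 then wl.drop middle else wl.drop (middle + 1)
    if compareScales left_scale right_scale == 0 then
      match PySem.List.pyGet? wl (middle : Int) with
      | some v => if v ≠ 1 then (middle : Int) else -1
      | none => 0   -- IndexError in Python (empty list); excluded by Pre_
    else if compareScales left_scale right_scale == 1 then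
      findRottenGoA fuel left_scale
    else
      if wl.length % 2 == 0 then
        (left_scale.length : Int) + findRottenGoA fuel right_scale
      else
        (left_scale.length : Int) + 1 + findRottenGoA fuel right_scale

def find_rotten (weight_list : List Int) : Int :=
  findRottenGoA (weight_list.length + 1) weight_list

-- ===== PORT B =====
-- Source B's prefix-table loop: fold carrying (prefix list, running total)
def buildPrefix (weight_list : List Int) : List Int :=
  (weight_list.foldl (fun p w => (p.1 ++ [p.2 + w], p.2 + w)) ([0], 0)).1

-- prefix[i]: every access in Source B's loop is in range (0 ≤ i ≤ len), so the
-- default of the total form is never used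
def pAt (pfx : List Int) (i : Nat) : Int := pfx.getD i 0

-- literal port of Source B's while loop: state (lo, hi), same fuel discipline
def findRottenGoB (ws pfx : List Int) : Nat → Nat → Nat → Int
  | 0, _, _ => 0    -- fuel exhausted: unreachable for fuel = length + 1
  | fuel + 1, lo, hi =>
    let mid := (hi - lo) / 2
    let odd := (hi - lo) % 2
    let left_sum := pAt pfx (lo + mid) - pAt pfx lo
    let right_sum := pAt pfx hi - pAt pfx (lo + mid + odd)
    let diff := left_sum - right_sum
    if diff == 0 then
      match PySem.List.pyGet? ws ((lo + mid : Nat) : Int) with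
      | some v => if v ≠ 1 then ((lo + mid : Nat) : Int) else (lo : Int) - 1
      | none => 0   -- IndexError in Python (empty list); excluded by Pre_
    else if diff < 0 then
      findRottenGoB ws pfx fuel lo (lo + mid)
    else
      findRottenGoB ws pfx fuel (lo + mid + odd) hi

def find_rotten_alt (weight_list : List Int) : Int :=
  findRottenGoB weight_list (buildPrefix weight_list)
    (weight_list.length + 1) 0 weight_list.length

-- ===== PRECONDITION & SPEC =====
-- Pre_ excludes only the empty list, where the Python A raises IndexError (weight_list[middle]).
def Pre_find_rotten (weight_list : List Int) : Prop := weight_list ≠ []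
instance (weight_list : List Int) : Decidable (Pre_find_rotten weight_list) := by
  unfold Pre_find_rotten; infer_instance

def pvWitness_find_rotten : List Int := [1, 2, 1]

def Spec_find_rotten (weight_list : List Int) (out : Int) : Prop := out = find_rotten_alt weight_list
instance (weight_list : List Int) (out : Int) : Decidable (Spec_find_rotten weight_list out) := by
  unfold Spec_find_rotten; infer_instance

-- ===== CLAIM (what is proved, stated in full; the proofs are below) =====
def Claim_equal_find_rotten : Prop := ∀ (weight_list : List Int), Dom_find_rotten weight_list → Pre_find_rotten weight_list → Spec_find_rotten weight_list (find_rotten weight_list)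

-- ===== LEMMAS AND PROOFS =====

-- the prefix list produced from running total t, one entry per element
def pl (t : Int) : List Int → List Int
  | [] => []
  | w :: r => (t + w) :: pl (t + w) r

theorem foldl_pl (ws : List Int) : ∀ (acc : List Int) (t : Int),
    ws.foldl (fun p w => (p.1 ++ [p.2 + w], p.2 + w)) (acc, t) = (acc ++ pl t ws, t + ws.sum) := by
  induction ws with
  | nil => intro acc t; simp [pl]
  | cons w r ih => intro acc t; simp [pl, ih, List.append_assoc]; ring

theorem pl_getD (ws : List Int) : ∀ (t : Int) (i : Nat), i ≤ ws.length →
    (t :: pl t ws).getD i 0 = t + (ws.take i).sum := by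
  induction ws with
  | nil =>
    intro t i hi
    have : i = 0 := by simpa using hi
    subst this; simp
  | cons w r ih =>
    intro t i hi
    cases i with
    | zero => simp
    | succ j =>
      simp only [pl, List.getD_cons_succ]
      rw [ih (t + w) j (by simpa using hi)]
      simp; ring

theorem buildPrefix_at (ws : List Int) (i : Nat) (hi : i ≤ ws.length) :
    pAt (buildPrefix ws) i = ((ws.take i).sum) := by
  have h := foldl_pl ws [0] 0
  have : buildPrefix ws = 0 :: pl 0 ws := by
    simp [buildPrefix, h]
  rw [pAt, this, pl_getD ws 0 i hi]; ring

-- sum of the segment [a, b) of ws as a difference of prefix sums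
theorem seg_sum (ws : List Int) (a b : Nat) (hab : a ≤ b) :
    ((ws.drop a).take (b - a)).sum = (ws.take b).sum - (ws.take a).sum := by
  have h : ws.take b = ws.take a ++ (ws.drop a).take (b - a) := by
    conv_lhs => rw [← Nat.add_sub_cancel' hab]
    rw [List.take_add]
  rw [h, List.sum_append]; ring

-- Loop/recursion correspondence: B's index loop computes lo + A's recursion on the segment.
theorem goB_eq_goA (ws : List Int) :
    ∀ (fuelA fuelB : Nat) (lo hi : Nat), lo < hi → hi ≤ ws.length →
      hi - lo ≤ fuelA → hi - lo ≤ fuelB →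
      findRottenGoB ws (buildPrefix ws) fuelB lo hi
        = (lo : Int) + findRottenGoA fuelA ((ws.drop lo).take (hi - lo)) := by
  intro fuelA
  induction fuelA with
  | zero => intro fuelB lo hi hlt _ hA _; omega
  | succ fA ih =>
    intro fuelB lo hi hlt hle hA hB
    obtain ⟨fB, rfl⟩ : ∃ fB, fuelB = fB + 1 := ⟨fuelB - 1, by omega⟩
    have hcl0 : ((ws.drop lo).take (hi - lo)).length = hi - lo := by
      simp; omega
    -- unfold one step of each program, then name the recurring pieces
    rw [findRottenGoB, findRottenGoA]
    set cur := (ws.drop lo).take (hi - lo) with hcur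
    set len := hi - lo with hlen
    have hcl : cur.length = len := hcl0
    simp only [hcl]
    set mid := len / 2 with hmiddef
    set odd := len % 2 with hodddef
    have hol : odd ≤ 1 := by omega
    have hmle : mid + odd ≤ len := by omega
    -- segment identities
    have hleft : cur.take mid = (ws.drop lo).take ((lo + mid) - lo) := by
      rw [hcur, List.take_take]
      congr 1; omega
    have hdropk : ∀ k : Nat, k ≤ len → cur.drop k = (ws.drop (lo + k)).take (hi - (lo + k)) := by
      intro k hk
      rw [hcur, List.drop_take, List.drop_drop]
      congr 1; omega
    -- sums of segments via the prefix table
    have hsum : ∀ a b : Nat, a ≤ b → b ≤ ws.length →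
        pAt (buildPrefix ws) b - pAt (buildPrefix ws) a = ((ws.drop a).take (b - a)).sum := by
      intro a b hab hbn
      rw [buildPrefix_at ws a (by omega), buildPrefix_at ws b hbn, seg_sum ws a b hab]
    have hLsum : pAt (buildPrefix ws) (lo + mid) - pAt (buildPrefix ws) lo = (cur.take mid).sum := by
      rw [hsum lo (lo + mid) (by omega) (by omega), hleft]
    have hRsum : pAt (buildPrefix ws) hi - pAt (buildPrefix ws) (lo + mid + odd) =
        (cur.drop (mid + odd)).sum := by
      have hx : lo + (mid + odd) = lo + mid + odd := by omega
      rw [hsum (lo + mid + odd) hi (by omega) hle, ← hx, hdropk (mid + odd) hmle]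
    -- A's right scale as a single drop expression
    have hright : (if (odd == 0) = true then cur.drop mid else cur.drop (mid + 1))
        = cur.drop (mid + odd) := by
      by_cases h0 : odd = 0
      · simp [h0]
      · have h1 : odd = 1 := by omega
        simp [h1]
    -- the element at the middle position
    have hget : PySem.List.pyGet? ws ((lo + mid : Nat) : Int) =
        PySem.List.pyGet? cur ((mid : Nat) : Int) := by
      rw [PySem.List.pyGet?_natCast, PySem.List.pyGet?_natCast, hcur,
          List.getElem?_take_of_lt (by omega : mid < len), List.getElem?_drop]
    rw [hright]
    simp only [hLsum, hRsum]
    set L := (cur.take mid).sum with hL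
    set R := (cur.drop (mid + odd)).sum with hR
    -- both tests compare the same two sums
    by_cases hz : L - R = 0
    · -- balanced: both return the middle branch
      have hc0 : compareScales (cur.take mid) (cur.drop (mid + odd)) = 0 := by
        simp only [compareScales, ← hL, ← hR]
        split_ifs <;> omega
      rw [if_pos (by simpa using hz), if_pos (by simp [hc0]), hget]
      have hmlt : mid < len := by omega
      obtain ⟨v, hv⟩ : ∃ v, PySem.List.pyGet? cur ((mid : Nat) : Int) = some v := by
        rw [PySem.List.pyGet?_natCast, List.getElem?_eq_getElem (by omega : mid < cur.length)]
        exact ⟨_, rfl⟩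
      rw [hv]
      by_cases hone : v = 1 <;> simp [hone] <;> ring
    · -- unbalanced: len ≥ 2 (for len = 1 both scales are empty, so L = R = 0)
      have hlen2 : 2 ≤ len := by
        by_contra hcon
        have h1 : len = 1 := by omega
        have he1 : cur.take mid = [] := by
          have : mid = 0 := by omega
          simp [this]
        have he2 : cur.drop (mid + odd) = [] := by
          apply List.drop_eq_nil_of_le; omega
        rw [hL, hR, he1, he2] at hz; simp at hz
      have hmid1 : 1 ≤ mid := by omega
      rw [if_neg (by simpa using hz)]
      by_cases hneg : L - R < 0
      · -- B narrows to the left half; A has compareScales = 1 and recurses left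
        have hc1 : compareScales (cur.take mid) (cur.drop (mid + odd)) = 1 := by
          simp only [compareScales, ← hL, ← hR]
          split_ifs <;> omega
        rw [if_pos hneg, hc1]
        simp only [show (((1:Int)) == 0) = false by decide, show (((1:Int)) == 1) = true by decide,
          Bool.false_eq_true, if_false, if_true]
        rw [ih fB lo (lo + mid) (by omega) (by omega) (by omega) (by omega), hleft]
      · -- B narrows to the right half; A has compareScales = -1 and recurses right
        have hcm : compareScales (cur.take mid) (cur.drop (mid + odd)) = -1 := by
          simp only [compareScales, ← hL, ← hR]
          split_ifs <;> omega
        rw [if_neg hneg, hcm]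
        simp only [show (((-1:Int)) == 0) = false by decide, show (((-1:Int)) == 1) = false by decide,
          Bool.false_eq_true, if_false]
        rw [ih fB (lo + mid + odd) hi (by omega) (by omega) (by omega) (by omega)]
        have hseg : cur.drop (mid + odd) = (ws.drop (lo + mid + odd)).take (hi - (lo + mid + odd)) := by
          have hx : lo + (mid + odd) = lo + mid + odd := by omega
          rw [hdropk (mid + odd) hmle, hx]
        rw [← hseg]
        have htl : (cur.take mid).length = mid := by
          rw [List.length_take]; omega
        rw [htl]
        by_cases h0 : odd = 0
        · simp only [h0, beq_self_eq_true, if_true]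
          push_cast
          ring
        · have h1 : odd = 1 := by omega
          simp only [h1, show ((1:Nat) == 0) = false by decide, Bool.false_eq_true, if_false]
          push_cast; ring

-- ===== VERDICT (by name: the statement is the Claim_ definition above) =====
theorem find_rotten_spec : Claim_equal_find_rotten := by
  intro wl _ hpre
  unfold Spec_find_rotten find_rotten find_rotten_alt
  have hn : 0 < wl.length := List.length_pos_iff.mpr hpre
  have h := goB_eq_goA wl (wl.length + 1) (wl.length + 1) 0 wl.length hn (le_refl _)
    (by omega) (by omega)
  rw [h]
  simp
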